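-- pv_equiv track=rewrite | github.com/Egoty62/Coding_Test_Study | Level_3/20231205/최고의_집합.py | solution
-- ===== SOURCE A (Python) =====
-- def solution(n, s):
--     if n > s : return [-1]
--     else :
--         answer = []
--         while n :
--             t = s // n
--             answer.append(t)
--             s = s - t
--             n -= 1
--
--         return answer
-- ===== SOURCE B (Python) =====
-- def solution(n, s):
--     if n > s:
--         return [-1]
--     if n == 0:
--         return []
--     q, r = divmod(s, n)
--     return [q] * (n - r) + [q + 1] * r
-- ===== Notes on version B (the rewrite author's own statement) =====
-- stated objective: simpler
-- what changed: Replaces A's per-element greedy while-loop of repeated floor divisions with a single closed-form divmod construction: n-r copies of q followed by r copies of q+1.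
import Mathlib
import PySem

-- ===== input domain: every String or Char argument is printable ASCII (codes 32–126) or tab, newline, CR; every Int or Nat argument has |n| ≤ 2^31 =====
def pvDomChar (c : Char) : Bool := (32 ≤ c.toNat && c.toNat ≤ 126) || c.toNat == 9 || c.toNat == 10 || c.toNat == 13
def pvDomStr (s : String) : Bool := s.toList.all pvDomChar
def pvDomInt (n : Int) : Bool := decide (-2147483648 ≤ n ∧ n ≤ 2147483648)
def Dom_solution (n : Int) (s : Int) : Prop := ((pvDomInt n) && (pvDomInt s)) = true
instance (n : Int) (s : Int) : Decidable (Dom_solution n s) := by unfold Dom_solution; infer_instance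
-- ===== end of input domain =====

-- B replaces A's greedy while-loop of repeated floor divisions with one closed-form divmod split (simpler).

-- ===== PORT A =====
-- A's while-loop; fuel = n.toNat, the exact number of iterations when 0 ≤ n
-- (for n < 0 the Python loop never terminates; Pre_solution excludes those inputs).
def solutionLoop : Nat → Int → Int → List Int → List Int
  | 0, _, _, acc => acc
  | Nat.succ f, n, s, acc =>
    if n ≠ 0 then
      let t := PySem.Int.floordiv s n
      solutionLoop f (n - 1) (s - t) (acc ++ [t])
    else acc

def solution (n : Int) (s : Int) : List Int :=
  if n > s then [-1]
  else solutionLoop n.toNat n s []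

-- ===== PORT B =====
def solution_alt (n : Int) (s : Int) : List Int :=
  if n > s then [-1]
  else if n = 0 then []
  else
    let q := PySem.Int.floordiv s n
    let r := PySem.Int.mod s n
    List.replicate (n - r).toNat q ++ List.replicate r.toNat (q + 1)

-- ===== PRECONDITION & SPEC =====
-- Pre_ excludes exactly the inputs with n < 0 ∧ n ≤ s, on which A's while-loop never terminates.
def Pre_solution (n : Int) (s : Int) : Prop := n > s ∨ 0 ≤ n
instance (n : Int) (s : Int) : Decidable (Pre_solution n s) := by unfold Pre_solution; infer_instance
def pvWitness_solution : Int × Int := (3, 7)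

def Spec_solution (n : Int) (s : Int) (out : List Int) : Prop := out = solution_alt n s
instance (n : Int) (s : Int) (out : List Int) : Decidable (Spec_solution n s out) := by unfold Spec_solution; infer_instance

-- ===== CLAIM (what is proved, stated in full; the proofs are below) =====
def Claim_equal_solution : Prop := ∀ (n : Int) (s : Int), Dom_solution n s → Pre_solution n s → Spec_solution n s (solution n s)

-- ===== LEMMAS AND PROOFS =====

theorem euclid_div (a b q r : Int) (hb : 0 < b) (h : a = q * b + r) (h0 : 0 ≤ r)
    (h1 : r < b) : a / b = q ∧ a % b = r := by
  rw [Int.ediv_emod_unique hb]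
  exact ⟨by rw [h]; ring, h0, h1⟩

theorem solutionLoop_eq (k : Nat) : ∀ (n s : Int) (acc : List Int), n = (k : Int) → 0 < n →
    solutionLoop k n s acc =
      acc ++ (List.replicate (n - s % n).toNat (s / n) ++ List.replicate (s % n).toNat (s / n + 1)) := by
  induction k with
  | zero => intro n s acc hk hn; omega
  | succ f ih =>
    intro n s acc hk hn
    have hn0 : n ≠ 0 := by omega
    simp only [solutionLoop, hn0, if_true, ne_eq, not_false_eq_true,
      PySem.Int.floordiv_eq_ediv_of_pos hn]
    by_cases hf : f = 0
    · subst hf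
      have hn1 : n = 1 := by omega
      subst hn1
      simp [solutionLoop]
    · -- n - 1 > 0
      have hn1 : (0:Int) < n - 1 := by omega
      set q := s / n with hq
      set r := s % n with hr
      have hsd : n * (s / n) + s % n = s := Int.mul_ediv_add_emod s n
      have hr0 : 0 ≤ r := Int.emod_nonneg s hn0
      have hrn : r < n := Int.emod_lt_of_pos s hn
      have hs' : s - q = q * (n - 1) + r := by rw [hq, hr]; linarith [hsd]
      rw [ih (n - 1) (s - q) (acc ++ [q]) (by omega) hn1]
      by_cases hcase : r < n - 1
      · obtain ⟨hd, hm⟩ := euclid_div (s - q) (n - 1) q r hn1 hs' hr0 hcase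
        rw [hd, hm]
        have h2 : (n - r).toNat = (n - 1 - r).toNat + 1 := by omega
        rw [h2, List.replicate_succ]
        simp
      · have hrq : r = n - 1 := by omega
        have hs'' : s - q = (q + 1) * (n - 1) + 0 := by rw [hs', hrq]; ring
        obtain ⟨hd, hm⟩ := euclid_div (s - q) (n - 1) (q + 1) 0 hn1 hs'' le_rfl hn1
        rw [hd, hm]
        have h1 : (n - r).toNat = 1 := by omega
        have h2 : (n - 1 - 0).toNat = r.toNat := by omega
        rw [h1, h2]
        simp

theorem solution_eq_alt : ∀ (n s : Int), Pre_solution n s → solution n s = solution_alt n s := by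
  intro n s hpre
  unfold solution solution_alt
  by_cases hgt : n > s
  · simp [hgt]
  · have hn0 : 0 ≤ n := by rcases hpre with h | h <;> omega
    by_cases hz : n = 0
    · subst hz; simp [solutionLoop]
    · have hn : 0 < n := by omega
      simp only [hgt, if_false, hz,
        PySem.Int.floordiv_eq_ediv_of_pos hn, PySem.Int.mod_eq_emod_of_pos hn]
      rw [solutionLoop_eq n.toNat n s [] (by omega) hn]
      simp

-- ===== VERDICT (by name: the statement is the Claim_ definition above) =====
theorem solution_spec : Claim_equal_solution := by
  intro n s _ hpre
  exact solution_eq_alt n s hpre
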